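-- pv_equiv track=rewrite | github.com/wonny-Jo/algorithm | 카카오 코딩테스트/2021 KAKAO BLIND RECRUITMENT/신규 아이디 추천.py | solution
-- ===== SOURCE A (Python) =====
-- def solution(new_id):
--     #step1. 대문자를 소문자로
--     answer=new_id.lower()
--     #step2. 허용되지 않는 문자 제거
--     i=0
--     while i<len(answer):
--         c=answer[i]
--         #if ('a'<=c<='z') or ('0'<=c<='9') or c=='-' or c=='_' or c=='.':
--         if c.isalnum() or c in '-_.':
--             i+=1
--             continue
--         answer=answer.replace(c,'')
--
--     #step3. ..를 .로 바꾸기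
--     while '..' in answer:
--         answer=answer.replace('..','.')
--
--     #step4. 맨앞과 뒤가 .이면 제거
--     if answer!='' and answer[0]=='.':
--         answer=answer[1:]
--     if answer!='' and answer[-1]=='.':
--         answer=answer[:-1]
--
--     #step5. 빈 문자열일 경우 a추가
--     if answer=='':
--         answer+='a'
--
--     #step6. 길이가 16자 이상이면 앞의 15자만 남김
--     if len(answer)>=16:
--         answer=answer[:15]
--         if answer[-1]=='.':
--             answer=answer[:-1]
--
--     #step7. 길이가 2자 이하이면 마지막 문자를 길이가 3이 될때까지 반복해서 끝에 붙임
--     while len(answer)<3: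
--         answer+=answer[-1]
--     return answer
-- ===== SOURCE B (Python) =====
-- def solution(new_id):
--     # single linear pass: lowercase, keep allowed chars, collapse runs of dots
--     out = []
--     for c in new_id.lower():
--         if c.isalnum() or c in '-_.':
--             if c != '.' or not (out and out[-1] == '.'):
--                 out.append(c)
--     # trim a leading / trailing dot (runs are already collapsed, so one is enough)
--     if out and out[0] == '.':
--         out = out[1:]
--     if out and out[-1] == '.':
--         out.pop()
--     if not out:
--         out = ['a']
--     # cap at 15 chars, dropping a trailing dot the cut may expose
--     out = out[:15]
--     if out[-1] == '.':
--         out.pop()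
--     # pad to length 3 with the last character
--     if len(out) < 3:
--         out.extend([out[-1]] * (3 - len(out)))
--     return ''.join(out)
-- ===== Notes on version B (the rewrite author's own statement) =====
-- stated objective: alternative
-- what changed: A repeatedly rescans and rebuilds the whole string (replace(c,'') inside the index loop and iterated replace('..','.')); B does one linear pass that lowercases, filters allowed characters and collapses dot runs on the fly, then trims, caps and pads.
import Mathlib
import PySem

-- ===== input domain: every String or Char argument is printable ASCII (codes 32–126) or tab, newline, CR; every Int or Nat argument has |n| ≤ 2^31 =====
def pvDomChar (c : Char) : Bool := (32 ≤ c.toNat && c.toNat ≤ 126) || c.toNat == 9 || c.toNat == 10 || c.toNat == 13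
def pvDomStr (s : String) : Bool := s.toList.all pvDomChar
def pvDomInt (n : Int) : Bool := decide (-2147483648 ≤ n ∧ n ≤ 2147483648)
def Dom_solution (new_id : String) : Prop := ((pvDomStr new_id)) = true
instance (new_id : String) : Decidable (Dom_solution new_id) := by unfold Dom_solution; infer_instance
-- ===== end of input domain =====

-- B replaces A's repeated whole-string `replace` rescans by one linear pass that filters
-- characters and collapses dot runs as it goes (objective: alternative single-pass algorithm).

-- ===== PORT A =====
-- Termination helpers for A's two while-loops (cited in decreasing_by):
-- `answer.replace(c,'')` removes every occurrence of c, i.e. filters.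
theorem pvGoSingle (c : Char) : ∀ (fuel : Nat) (l acc : List Char), l.length ≤ fuel →
    PySem.Chars.replace.go [c] [] fuel l acc = acc.reverse ++ l.filter (fun x => x != c) := by
  intro fuel
  induction fuel with
  | zero => intro l acc h; simp at h; subst h; simp [PySem.Chars.replace.go]
  | succ n ih =>
    intro l acc h
    cases l with
    | nil => simp [PySem.Chars.replace.go]
    | cons a t =>
      simp only [PySem.Chars.replace.go]
      by_cases hc : a = c
      · subst hc
        simp only [List.isPrefixOf, BEq.rfl, Bool.true_and, if_pos]
        rw [ih]
        · simp
        · simpa using Nat.le_of_succ_le_succ h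
      · have hpre : ¬ ([c].isPrefixOf (a :: t) = true) := by
          simp [List.isPrefixOf]; intro hh; exact absurd hh.symm hc
        rw [if_neg hpre, ih _ _ (Nat.le_of_succ_le_succ h)]
        have hb : (a != c) = true := by simp [bne, hc]
        simp [hb]

theorem pvReplace_single (c : Char) (s : List Char) :
    PySem.Chars.replace s [c] [] = s.filter (fun x => x != c) := by
  rw [PySem.Chars.replace]
  simp only [List.isEmpty_cons]
  exact pvGoSingle c s.length s [] le_rfl

-- `answer.replace('..','.')`: Python's left-to-right non-overlapping replacement.
def pvRep : List Char → List Char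
  | [] => []
  | [a] => [a]
  | a :: b :: t => if a = '.' ∧ b = '.' then '.' :: pvRep t else a :: pvRep (b :: t)

theorem pvGoDD : ∀ (fuel : Nat) (l acc : List Char), l.length ≤ fuel →
    PySem.Chars.replace.go ['.', '.'] ['.'] fuel l acc = acc.reverse ++ pvRep l := by
  intro fuel
  induction fuel with
  | zero => intro l acc h; simp at h; subst h; simp [PySem.Chars.replace.go, pvRep]
  | succ n ih =>
    intro l acc h
    cases l with
    | nil => simp [PySem.Chars.replace.go, pvRep]
    | cons a t =>
      cases t with
      | nil =>
        have hpre : ¬ ((['.', '.'] : List Char).isPrefixOf [a] = true) := by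
          simp [List.isPrefixOf]
        simp only [PySem.Chars.replace.go, if_neg hpre]
        rw [ih _ _ (by simp)]
        simp [pvRep]
      | cons b u =>
        by_cases hd : a = '.' ∧ b = '.'
        · obtain ⟨ha, hb⟩ := hd; subst ha; subst hb
          have hpre : (['.', '.'] : List Char).isPrefixOf ('.' :: '.' :: u) = true := by
            simp [List.isPrefixOf]
          simp only [PySem.Chars.replace.go, if_pos hpre]
          rw [ih _ _ (by simp at h ⊢; omega)]
          simp [pvRep]
        · have hpre : ¬ ((['.', '.'] : List Char).isPrefixOf (a :: b :: u) = true) := by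
            simp [List.isPrefixOf]; intro h1 h2; exact hd ⟨h1.symm, h2.symm⟩
          simp only [PySem.Chars.replace.go, if_neg hpre]
          rw [ih _ _ (Nat.le_of_succ_le_succ h)]
          simp [pvRep, if_neg hd]

theorem pvReplace_dd (s : List Char) :
    PySem.Chars.replace s ['.', '.'] ['.'] = pvRep s := by
  rw [PySem.Chars.replace]
  simp only [List.isEmpty_cons]
  exact pvGoDD s.length s [] le_rfl

theorem pvRep_length_le : ∀ l : List Char, (pvRep l).length ≤ l.length := by
  intro l
  induction l using pvRep.induct with
  | case1 => simp [pvRep]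
  | case2 a => simp [pvRep]
  | case3 a b t hd ih => simp only [pvRep, if_pos hd]; simp at ih ⊢; omega
  | case4 a b t hd ih => simp only [pvRep, if_neg hd]; simp at ih ⊢; omega

theorem pvRep_length_lt : ∀ l : List Char, (['.', '.'] : List Char) <:+: l →
    (pvRep l).length < l.length := by
  intro l
  induction l using pvRep.induct with
  | case1 => intro h; exact absurd (List.eq_nil_of_infix_nil h) (by simp)
  | case2 a => intro h; have := h.length_le; simp at this
  | case3 a b t hd ih =>
    intro _
    have := pvRep_length_le t
    simp only [pvRep, if_pos hd]; simp; omega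
  | case4 a b t hd ih =>
    intro h
    have ht : (['.', '.'] : List Char) <:+: b :: t := by
      rcases List.infix_cons_iff.mp h with hp | hi
      · exfalso
        rcases hp with ⟨u, hu⟩
        simp at hu
        exact hd ⟨hu.1.symm, hu.2.1.symm⟩
      · exact hi
    have := ih ht
    simp only [pvRep, if_neg hd]; simp at this ⊢; omega

theorem pvReplaceDD_length (l : List Char)
    (h : PySem.Chars.isIn ['.', '.'] l = true) :
    (PySem.Chars.replace l ['.', '.'] ['.']).length < l.length := by
  rw [pvReplace_dd]
  exact pvRep_length_lt l ((PySem.Chars.isIn_iff_infix _ _).mp h)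

-- step2: while i < len(answer): keep allowed chars, else answer = answer.replace(c, '')
def solLoop2 (answer : List Char) (i : Nat) : List Char :=
  if h : i < answer.length then
    let c := answer[i]
    if PySem.Chars.isalnum c || PySem.Chars.isIn [c] ['-', '_', '.'] then
      solLoop2 answer (i + 1)
    else
      solLoop2 (PySem.Chars.replace answer [c] []) i
  else answer
termination_by answer.length - i
decreasing_by
  · omega
  · rw [pvReplace_single]
    have hlt : (answer.filter (fun x => x != answer[i])).length < answer.length :=
      List.length_filter_lt_length_iff_exists.mpr ⟨answer[i], answer.getElem_mem h, by simp⟩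
    omega

-- step3: while '..' in answer: answer = answer.replace('..', '.')
def solLoop3 (answer : List Char) : List Char :=
  if h : PySem.Chars.isIn ['.', '.'] answer = true then
    solLoop3 (PySem.Chars.replace answer ['.', '.'] ['.'])
  else answer
termination_by answer.length
decreasing_by exact pvReplaceDD_length answer h

-- step7: while len(answer) < 3: answer += answer[-1]  (answer[-1] = none marks IndexError,
-- unreachable in A's flow since the string is nonempty there)
def solPad (answer : List Char) : List Char :=
  if answer.length < 3 then
    match PySem.List.pyGet? answer (-1) with
    | some ch => solPad (answer ++ [ch])
    | none => answer
  else answer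
termination_by 3 - answer.length
decreasing_by simp; omega

def solution (new_id : String) : String :=
  let a1 := PySem.Chars.lower new_id.toList
  let a2 := solLoop2 a1 0
  let a3 := solLoop3 a2
  let a4 := if a3 ≠ [] ∧ PySem.Chars.pyGet? a3 0 = some '.' then PySem.Chars.slice a3 (some 1) none else a3
  let a5 := if a4 ≠ [] ∧ PySem.Chars.pyGet? a4 (-1) = some '.' then PySem.Chars.slice a4 none (some (-1)) else a4
  let a6 := if a5 = [] then a5 ++ ['a'] else a5
  let a7 := if 16 ≤ a6.length then
      let b := PySem.Chars.slice a6 none (some 15)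
      if PySem.Chars.pyGet? b (-1) = some '.' then PySem.Chars.slice b none (some (-1)) else b
    else a6
  String.ofList (solPad a7)

-- ===== PORT B =====
def solution_alt (new_id : String) : String :=
  let out := (PySem.Chars.lower new_id.toList).foldl
    (fun out c =>
      if PySem.Chars.isalnum c || PySem.Chars.isIn [c] ['-', '_', '.'] then
        if c != '.' || !(!out.isEmpty && out.getLast? == some '.') then out ++ [c] else out
      else out) []
  let t1 := if out ≠ [] ∧ out.head? = some '.' then out.tail else out
  let t2 := if t1 ≠ [] ∧ t1.getLast? = some '.' then t1.dropLast else t1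
  let t3 := if t2 = [] then ['a'] else t2
  let t4 := t3.take 15
  let t5 := if t4.getLast? = some '.' then t4.dropLast else t4
  if t5.length < 3 then String.ofList (t5 ++ List.replicate (3 - t5.length) (t5.getLast?.getD 'a'))
  else String.ofList t5

-- ===== PRECONDITION & SPEC =====
def Spec_solution (new_id : String) (out : String) : Prop := out = solution_alt new_id
instance (new_id : String) (out : String) : Decidable (Spec_solution new_id out) := by unfold Spec_solution; infer_instance

-- ===== CLAIM (what is proved, stated in full; the proofs are below) =====
def Claim_equal_solution : Prop := ∀ (new_id : String), Dom_solution new_id → Spec_solution new_id (solution new_id)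

-- ===== LEMMAS AND PROOFS =====
def pvAllowed (c : Char) : Bool :=
  PySem.Chars.isalnum c || PySem.Chars.isIn [c] ['-', '_', '.']

-- collapse runs of dots; p = "the previous kept character was a dot"
def pvColT (p : Bool) : List Char → List Char
  | [] => []
  | c :: t => if p && (c == '.') then pvColT p t else c :: pvColT (c == '.') t

def pvCol (l : List Char) : List Char := pvColT false l

theorem pvLoop2_spec : ∀ (n : Nat) (pre suf : List Char), suf.length ≤ n →
    (∀ x ∈ pre, pvAllowed x = true) →
    solLoop2 (pre ++ suf) pre.length = pre ++ suf.filter pvAllowed := by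
  intro n
  induction n with
  | zero =>
    intro pre suf h _
    have : suf = [] := by simpa using List.eq_nil_of_length_eq_zero (Nat.le_zero.mp h)
    subst this
    rw [solLoop2, dif_neg (by simp)]
    simp
  | succ n ih =>
    intro pre suf hlen hpre
    cases suf with
    | nil =>
      rw [solLoop2, dif_neg (by simp)]
      simp
    | cons c t =>
      have hi : pre.length < (pre ++ c :: t).length := by simp
      rw [solLoop2, dif_pos hi]
      have hc : (pre ++ c :: t)[pre.length]'hi = c := by
        rw [List.getElem_append_right (Nat.le_refl pre.length)]
        simp
      simp only [hc]
      by_cases hA : pvAllowed c = true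
      · rw [if_pos (by simpa [pvAllowed] using hA)]
        have : pre ++ c :: t = (pre ++ [c]) ++ t := by simp
        rw [this]
        have hlen1 : pre.length + 1 = (pre ++ [c]).length := by simp
        rw [hlen1, ih (pre ++ [c]) t (by simpa using Nat.le_of_succ_le_succ hlen)
          (by intro x hx; rcases List.mem_append.mp hx with h | h
              · exact hpre x h
              · simp at h; subst h; exact hA)]
        simp [hA]
      · rw [if_neg (by simpa [pvAllowed] using hA)]
        rw [pvReplace_single]
        have hfil : (pre ++ c :: t).filter (fun x => x != c) = pre ++ t.filter (fun x => x != c) := by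
          rw [List.filter_append, List.filter_cons]
          have hcc : (c != c) = false := by simp
          rw [hcc]
          simp only [Bool.false_eq_true, if_false]
          congr 1
          apply List.filter_eq_self.mpr
          intro x hx
          have hxa := hpre x hx
          by_contra hne
          simp at hne
          subst hne
          exact hA hxa
        rw [hfil, ih pre (t.filter (fun x => x != c))
          (le_trans (List.length_filter_le _ _) (Nat.le_of_succ_le_succ hlen)) hpre]
        congr 1
        rw [List.filter_cons]
        have hAc : pvAllowed c = false := by simpa using hA
        rw [hAc]
        simp only [Bool.false_eq_true, if_false]
        rw [List.filter_filter]
        apply List.filter_congr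
        intro x _
        by_cases hxA : pvAllowed x = true
        · have : (x != c) = true := by
            simp only [bne_iff_ne, ne_eq]
            intro hxc; subst hxc; exact hA hxA
          simp [this, hxA]
        · simp [Bool.and_comm]
          intro h'
          exact absurd h' hxA

theorem pvColT_rep : ∀ (l : List Char) (p : Bool), pvColT p (pvRep l) = pvColT p l := by
  intro l
  induction l using pvRep.induct with
  | case1 => intro p; rfl
  | case2 a => intro p; rfl
  | case3 a b t hd ih =>
    intro p
    obtain ⟨ha, hb⟩ := hd; subst ha; subst hb
    cases p with
    | false => simp [pvRep, pvColT, ih]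
    | true => simp [pvRep, pvColT, ih]
  | case4 a b t hd ih =>
    intro p
    by_cases hp : p && (a == '.')
    · simp only [pvRep, if_neg hd, pvColT, if_pos hp]
      exact ih p
    · simp only [pvRep]
      rw [if_neg hd]
      conv_lhs => rw [pvColT]
      conv_rhs => rw [pvColT]
      rw [if_neg hp, if_neg hp, ih]

theorem pvColT_fix : ∀ (l : List Char) (p : Bool), ¬ ((['.', '.'] : List Char) <:+: l) →
    (p = true → l.head? ≠ some '.') → pvColT p l = l := by
  intro l
  induction l with
  | nil => intro p _ _; rfl
  | cons c t ih =>
    intro p hn hh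
    have hskip : (p && (c == '.')) = false := by
      cases p
      · simp
      · simp only [Bool.true_and]
        by_contra hc
        simp at hc
        exact (hh rfl) (by simp [hc])
    rw [pvColT, hskip]
    simp only [Bool.false_eq_true, if_false]
    congr 1
    apply ih
    · intro hx; exact hn (hx.trans (List.infix_cons (List.infix_refl t)))
    · intro hc hhead
      simp at hc
      subst hc
      cases t with
      | nil => simp at hhead
      | cons d u =>
        simp at hhead
        subst hhead
        exact hn ⟨[], u, by simp⟩

theorem pvLoop3_col : ∀ l : List Char, solLoop3 l = pvCol l := by
  intro l
  induction l using solLoop3.induct with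
  | case1 answer h ih =>
    rw [solLoop3, dif_pos h, ih, pvReplace_dd, pvCol, pvCol, pvColT_rep]
  | case2 answer h =>
    rw [solLoop3, dif_neg h]
    refine (pvColT_fix answer false ?_ (by simp)).symm
    exact (PySem.Chars.isIn_eq_false_iff _ _).mp (by simpa using h)

theorem pvColT_head (l : List Char) : (pvColT true l).head? ≠ some '.' := by
  induction l with
  | nil => simp [pvColT]
  | cons c t ih =>
    by_cases hc : c = '.'
    · subst hc; simpa [pvColT] using ih
    · rw [pvColT]
      simp [hc]

theorem pvColT_noDD : ∀ (l : List Char) (p : Bool), ¬ ((['.', '.'] : List Char) <:+: pvColT p l) := by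
  intro l
  induction l with
  | nil => intro p; simp [pvColT]
  | cons c t ih =>
    intro p
    by_cases hp : (p && (c == '.')) = true
    · rw [pvColT, hp]; simp only [if_true]; exact ih p
    · rw [pvColT, if_neg (by simp [hp])]
      intro hinf
      rcases List.infix_cons_iff.mp hinf with hpre | hi
      · rcases hpre with ⟨u, hu⟩
        have hu' : ('.' : Char) :: '.' :: u = c :: pvColT (c == '.') t := by simpa using hu
        injection hu' with h1 h2
        have hhd : (pvColT (c == '.') t).head? = some '.' := by rw [← h2]; rfl
        rw [← h1] at hhd
        exact pvColT_head t (by simpa using hhd)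
      · exact ih _ hi

theorem pvFold_spec : ∀ (l acc : List Char),
    l.foldl (fun out c =>
      if PySem.Chars.isalnum c || PySem.Chars.isIn [c] ['-', '_', '.'] then
        if c != '.' || !(!out.isEmpty && out.getLast? == some '.') then out ++ [c] else out
      else out) acc = acc ++ pvColT (acc.getLast? == some '.') (l.filter pvAllowed) := by
  intro l
  induction l with
  | nil => intro acc; simp [pvColT]
  | cons c t ih =>
    intro acc
    rw [List.foldl_cons]
    have hstate : ∀ out : List Char, (!out.isEmpty && (out.getLast? == some '.')) = (out.getLast? == some '.') := by
      intro out; cases out <;> simp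
    by_cases hA : pvAllowed c = true
    · rw [List.filter_cons, hA]
      simp only [if_true]
      by_cases hcond : (c != '.' || !(acc.getLast? == some '.')) = true
      · have : (if PySem.Chars.isalnum c || PySem.Chars.isIn [c] ['-', '_', '.'] then
            if c != '.' || !(!acc.isEmpty && acc.getLast? == some '.') then acc ++ [c] else acc
          else acc) = acc ++ [c] := by
          rw [if_pos (by simpa [pvAllowed] using hA), hstate, if_pos hcond]
        rw [this, ih]
        have hlast : ((acc ++ [c]).getLast? == some '.') = (c == '.') := by simp
        rw [hlast]
        have hskip : ((acc.getLast? == some '.') && (c == '.')) = false := by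
          rcases Bool.or_eq_true_iff.mp hcond with h | h
          · simp only [bne_iff_ne, ne_eq] at h
            simp [h]
          · simp only [Bool.not_eq_true'] at h
            simp [h]
        rw [pvColT, hskip]
        simp
      · have hc : (c == '.') = true ∧ (acc.getLast? == some '.') = true := by
          simp only [Bool.or_eq_true_iff, not_or, Bool.not_eq_true] at hcond
          constructor
          · simpa using hcond.1
          · simpa using hcond.2
        have : (if PySem.Chars.isalnum c || PySem.Chars.isIn [c] ['-', '_', '.'] then
            if c != '.' || !(!acc.isEmpty && acc.getLast? == some '.') then acc ++ [c] else acc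
          else acc) = acc := by
          rw [if_pos (by simpa [pvAllowed] using hA), hstate, if_neg hcond]
        rw [this, ih]
        rw [pvColT, hc.2, hc.1]
        simp
    · rw [List.filter_cons]
      have hAc : pvAllowed c = false := by simpa using hA
      rw [hAc]
      simp only [Bool.false_eq_true, if_false]
      have : (if PySem.Chars.isalnum c || PySem.Chars.isIn [c] ['-', '_', '.'] then
          if c != '.' || !(!acc.isEmpty && acc.getLast? == some '.') then acc ++ [c] else acc
        else acc) = acc := by
        rw [if_neg (by simpa [pvAllowed] using hA)]
      rw [this, ih]

theorem pvNoDD_last (w : List Char) (hn : ¬ ((['.', '.'] : List Char) <:+: w))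
    (h : w.getLast? = some '.') : w.dropLast.getLast? ≠ some '.' := by
  intro h'
  obtain ⟨b, hb⟩ := List.getLast?_eq_some_iff.mp h'
  have hw : w = w.dropLast ++ ['.'] := by
    have hne : w ≠ [] := by intro hx; subst hx; simp at h
    conv_lhs => rw [← List.dropLast_append_getLast hne]
    congr 1
    simp [List.getLast_eq_iff_getLast?_eq_some hne, h]
  apply hn
  rw [hw, hb]
  exact ⟨b, [], by simp⟩

theorem pvGetNeg1 (l : List Char) : PySem.List.pyGet? l (-1) = l.getLast? := by
  simp [pysem]

theorem pvGet0 (l : List Char) : PySem.Chars.pyGet? l 0 = l.head? := by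
  cases l <;> simp [pysem]

theorem pvPad_spec : ∀ v : List Char, v ≠ [] →
    solPad v = if v.length < 3 then v ++ List.replicate (3 - v.length) (v.getLast?.getD 'a') else v := by
  intro v hv
  match v with
  | [a] =>
    rw [solPad, if_pos (by simp), pvGetNeg1]
    simp only [List.getLast?_singleton]
    rw [solPad, if_pos (by simp), pvGetNeg1]
    have h2 : ([a] ++ [a]).getLast? = some a := by simp
    rw [h2]
    show solPad ([a] ++ [a] ++ [a]) = _
    rw [solPad, if_neg (by simp)]
    simp [List.replicate]
  | [a, b] =>
    rw [solPad, if_pos (by simp), pvGetNeg1]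
    have h1 : ([a, b] : List Char).getLast? = some b := by simp
    rw [h1]
    show solPad ([a, b] ++ [b]) = _
    rw [solPad, if_neg (by simp)]
    simp
  | a :: b :: c :: u =>
    rw [solPad, if_neg (by simp), if_neg (by simp)]

theorem pvGetNeg1C (l : List Char) : PySem.Chars.pyGet? l (-1) = l.getLast? := by
  simp [pysem]

theorem pvSlice1 (l : List Char) : PySem.Chars.slice l (some 1) none = l.tail := by
  simp [pysem]

theorem pvSliceNeg1 (l : List Char) : PySem.Chars.slice l none (some (-1)) = l.dropLast := by
  simp [pysem]

theorem pvSlice15 (l : List Char) : PySem.Chars.slice l none (some 15) = l.take 15 := by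
  simp [pysem]

theorem pvPad_a : solPad ['a'] = ['a', 'a', 'a'] := by
  rw [pvPad_spec _ (by simp)]
  simp

theorem pvTail_eq (m : List Char) (hn : ¬ ((['.', '.'] : List Char) <:+: m)) :
    (let a4 := if m ≠ [] ∧ PySem.Chars.pyGet? m 0 = some '.' then PySem.Chars.slice m (some 1) none else m
     let a5 := if a4 ≠ [] ∧ PySem.Chars.pyGet? a4 (-1) = some '.' then PySem.Chars.slice a4 none (some (-1)) else a4
     let a6 := if a5 = [] then a5 ++ ['a'] else a5
     let a7 := if 16 ≤ a6.length then
         let b := PySem.Chars.slice a6 none (some 15)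
         if PySem.Chars.pyGet? b (-1) = some '.' then PySem.Chars.slice b none (some (-1)) else b
       else a6
     String.ofList (solPad a7)) =
    (let t1 := if m ≠ [] ∧ m.head? = some '.' then m.tail else m
     let t2 := if t1 ≠ [] ∧ t1.getLast? = some '.' then t1.dropLast else t1
     let t3 := if t2 = [] then ['a'] else t2
     let t4 := t3.take 15
     let t5 := if t4.getLast? = some '.' then t4.dropLast else t4
     if t5.length < 3 then String.ofList (t5 ++ List.replicate (3 - t5.length) (t5.getLast?.getD 'a'))
     else String.ofList t5) := by
  simp only [pvGet0, pvGetNeg1C, pvSlice1, pvSliceNeg1, pvSlice15]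
  set v1 := if m ≠ [] ∧ m.head? = some '.' then m.tail else m with hv1
  have hn1 : ¬ ((['.', '.'] : List Char) <:+: v1) := by
    rw [hv1]; split_ifs with h
    · exact fun hx => hn (hx.trans (List.tail_suffix m).isInfix)
    · exact hn
  set v2 := if v1 ≠ [] ∧ v1.getLast? = some '.' then v1.dropLast else v1 with hv2
  have hlast2 : v2 ≠ [] → v2.getLast? ≠ some '.' := by
    rw [hv2]; split_ifs with h
    · intro _; exact pvNoDD_last v1 hn1 h.2
    · intro hne hcon; exact h ⟨hne, hcon⟩
  by_cases h0 : v2 = []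
  · rw [if_pos h0, if_pos h0, h0, List.nil_append]
    have h16 : ¬ (16 ≤ (['a'] : List Char).length) := by simp
    rw [if_neg h16]
    have ht4 : (['a'] : List Char).take 15 = ['a'] := by simp
    rw [ht4]
    have ht5 : ¬ ((['a'] : List Char).getLast? = some '.') := by simp
    rw [if_neg ht5]
    rw [pvPad_a]
    simp
  · rw [if_neg h0, if_neg h0]
    have hlast : v2.getLast? ≠ some '.' := hlast2 h0
    by_cases h16 : 16 ≤ v2.length
    · rw [if_pos h16]
      have htk : (v2.take 15).length = 15 := by simp; omega
      by_cases hdot : (v2.take 15).getLast? = some '.'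
      · rw [if_pos hdot]
        have hne : (v2.take 15).dropLast ≠ [] := by
          intro hx
          have := congrArg List.length hx
          simp [htk] at this
        have hlen : ¬ ((v2.take 15).dropLast.length < 3) := by
          simp [htk]
        rw [pvPad_spec _ hne, if_neg hlen, if_neg hlen]
      · rw [if_neg hdot]
        have hne : v2.take 15 ≠ [] := by
          intro hx
          have := congrArg List.length hx
          simp [htk] at this
        have hlen : ¬ ((v2.take 15).length < 3) := by
          simp [htk]
        rw [pvPad_spec _ hne, if_neg hlen, if_neg hlen]
    · rw [if_neg h16]
      have ht4 : v2.take 15 = v2 := List.take_of_length_le (by omega)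
      rw [ht4, if_neg hlast]
      rw [pvPad_spec _ h0]
      split_ifs <;> rfl

-- ===== VERDICT (by name: the statement is the Claim_ definition above) =====
theorem solution_spec : Claim_equal_solution := by
  intro s _
  unfold Spec_solution solution solution_alt
  have hloop2 : solLoop2 (PySem.Chars.lower s.toList) 0
      = (PySem.Chars.lower s.toList).filter pvAllowed := by
    simpa using pvLoop2_spec (PySem.Chars.lower s.toList).length [] (PySem.Chars.lower s.toList)
      le_rfl (by simp)
  have hfold : (PySem.Chars.lower s.toList).foldl
      (fun out c =>
        if PySem.Chars.isalnum c || PySem.Chars.isIn [c] ['-', '_', '.'] then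
          if c != '.' || !(!out.isEmpty && out.getLast? == some '.') then out ++ [c] else out
        else out) []
      = pvCol ((PySem.Chars.lower s.toList).filter pvAllowed) := by
    simpa [pvCol] using pvFold_spec (PySem.Chars.lower s.toList) []
  simp only [hloop2, pvLoop3_col, hfold]
  exact pvTail_eq _ (pvColT_noDD _ false)
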